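-- pv_equiv track=rewrite | github.com/daniel-reich/ubiquitous-fiesta | Wd9cCvFKC3fHzgqSx_12.py | num_split
-- ===== SOURCE A (Python) =====
-- def num_split(num):
--   i=0
--   ls = []
--   n = abs(num)
--   while n!=0:
--     mod = n%10
--     pv = mod*(10**i)
--     n = n//10
--     if num<0:
--       ls.insert(0,-pv)
--     else:
--       ls.insert(0,pv)
--     i = i+1
--   return ls
-- ===== SOURCE B (Python) =====
-- def num_split(num):
--     if num < 0:
--         return [-pv for pv in num_split(-num)]
--     if num == 0:
--         return []
--     return [10 * pv for pv in num_split(num // 10)] + [num % 10]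
-- ===== Notes on version B (the rewrite author's own statement) =====
-- stated objective: simpler
-- what changed: Replaces the iterative mod/div loop with an incrementing power counter and front-insertion by a short recursion that splits off the last digit and scales the recursively obtained prefix components by a factor of ten, appending at the back.
import Mathlib
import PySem

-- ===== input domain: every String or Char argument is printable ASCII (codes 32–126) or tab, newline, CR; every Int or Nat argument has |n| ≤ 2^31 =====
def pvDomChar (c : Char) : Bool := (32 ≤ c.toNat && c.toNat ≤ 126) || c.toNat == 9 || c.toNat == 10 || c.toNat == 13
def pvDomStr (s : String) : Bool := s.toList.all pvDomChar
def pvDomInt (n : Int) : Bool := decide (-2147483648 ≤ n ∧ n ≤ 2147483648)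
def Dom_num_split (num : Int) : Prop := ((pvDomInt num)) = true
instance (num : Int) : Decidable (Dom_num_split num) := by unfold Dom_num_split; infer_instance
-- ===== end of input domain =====

-- B replaces A's mod/div loop (power counter, front-insertion) by a short recursion that
-- splits off the last digit and scales the recursive prefix by 10; objective: simpler.


-- ===== PORT A =====
-- A's while loop; n = abs(num) stays nonnegative throughout, so it is carried as a Nat
-- (Nat % and / coincide with Python's % and // on nonnegative operands — exact here).
def numSplitLoop (num : Int) (n : Nat) (i : Nat) (ls : List Int) : List Int :=
  if n ≠ 0 then
    let mod : Int := (n % 10 : Nat)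
    let pv : Int := mod * (10 ^ i)
    numSplitLoop num (n / 10) (i + 1) (if num < 0 then (-pv) :: ls else pv :: ls)
  else ls
termination_by n
decreasing_by exact Nat.div_lt_self (Nat.pos_of_ne_zero (by assumption)) (by norm_num)

def num_split (num : Int) : List Int := numSplitLoop num num.natAbs 0 []

-- ===== PORT B =====
def num_split_alt (num : Int) : List Int :=
  if num < 0 then (num_split_alt (-num)).map (fun pv => -pv)
  else if num = 0 then []
  else (num_split_alt (PySem.Int.floordiv num 10)).map (fun pv => 10 * pv)
         ++ [PySem.Int.mod num 10]
termination_by 2 * num.natAbs + (if num < 0 then 1 else 0)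
decreasing_by
  · simp_all; omega
  · rename_i h1 h2
    rw [PySem.Int.floordiv_eq_ediv_of_pos (by norm_num : (0:Int) < 10)]
    have h0 : 0 < num := by omega
    have hq : 0 ≤ num / 10 := Int.ediv_nonneg h0.le (by norm_num)
    rw [if_neg (not_lt.mpr hq), if_neg (not_lt.mpr h0.le)]
    omega

-- ===== PRECONDITION & SPEC =====
def Spec_num_split (num : Int) (out : List Int) : Prop := out = num_split_alt num
instance (num : Int) (out : List Int) : Decidable (Spec_num_split num out) := by unfold Spec_num_split; infer_instance

-- ===== CLAIM (what is proved, stated in full; the proofs are below) =====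
def Claim_equal_num_split : Prop := ∀ (num : Int), Dom_num_split num → Spec_num_split num (num_split num)

-- ===== LEMMAS AND PROOFS =====

-- the value of B on a nonnegative input, as a Nat recursion
def gSplit (n : Nat) : List Int :=
  if n = 0 then [] else (gSplit (n / 10)).map (fun pv => 10 * pv) ++ [((n % 10 : Nat) : Int)]
termination_by n
decreasing_by exact Nat.div_lt_self (Nat.pos_of_ne_zero (by assumption)) (by norm_num)

lemma num_split_alt_natCast (n : Nat) : num_split_alt (n : Int) = gSplit n := by
  induction n using Nat.strong_induction_on with
  | _ n ih =>
    rw [num_split_alt, gSplit]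
    by_cases h : n = 0
    · simp [h]
    · have hpos : (0:Int) < (n:Int) := by exact_mod_cast Nat.pos_of_ne_zero h
      have hfd : PySem.Int.floordiv (n : Int) 10 = ((n / 10 : Nat) : Int) := by
        exact_mod_cast PySem.Int.floordiv_natCast n 10
      have hmd : PySem.Int.mod (n : Int) 10 = ((n % 10 : Nat) : Int) := by
        exact_mod_cast PySem.Int.mod_natCast n 10
      simp only [hfd, hmd]
      rw [ih (n / 10) (Nat.div_lt_self (Nat.pos_of_ne_zero h) (by norm_num))]
      simp [h, not_lt.mpr hpos.le]

lemma numSplitLoop_eq (num : Int) (n i : Nat) (ls : List Int) :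
    numSplitLoop num n i ls
      = (gSplit n).map (fun pv => (if num < 0 then -pv else pv) * 10 ^ i) ++ ls := by
  induction n using Nat.strong_induction_on generalizing i ls with
  | _ n ih =>
    rw [numSplitLoop, gSplit]
    by_cases h : n = 0
    · simp [h]
    · simp only [h, if_true, ne_eq, not_false_iff, if_neg]
      rw [ih (n / 10) (Nat.div_lt_self (Nat.pos_of_ne_zero h) (by norm_num))]
      simp only [List.map_append, List.map_map, List.map_cons, List.map_nil,
        List.append_assoc, List.cons_append, List.nil_append]
      have hmap := List.map_congr_left
        (l := gSplit (n / 10))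
        (f := (fun pv => (if num < 0 then -pv else pv) * 10 ^ i) ∘ fun pv : Int => 10 * pv)
        (g := fun pv => (if num < 0 then -pv else pv) * 10 ^ (i + 1))
        (fun pv _ => by simp only [Function.comp_apply]; split_ifs <;> ring)
      rw [hmap]
      split_ifs with hneg
      · exact congrArg₂ (· ++ ·) rfl (congrArg (· :: ls) (by ring))
      · rfl

-- ===== VERDICT (by name: the statement is the Claim_ definition above) =====
theorem num_split_spec : Claim_equal_num_split := by
  intro num _
  unfold Spec_num_split num_split
  rw [numSplitLoop_eq]
  by_cases h : num < 0
  · have : num_split_alt num = (num_split_alt (-num)).map (fun pv => -pv) := by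
      rw [num_split_alt]; simp [h]
    rw [this]
    have hn : (-num) = ((num.natAbs : Nat) : Int) := by omega
    rw [hn, num_split_alt_natCast]
    simp [h]
  · have hn : num = ((num.natAbs : Nat) : Int) := by omega
    conv_rhs => rw [hn]
    rw [num_split_alt_natCast]
    simp [h]
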